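-- pv_equiv track=rewrite | github.com/iezyzhang/Project | Demo/第一季/函数/多个返回值.py | get_result_01
-- ===== SOURCE A (Python) =====
-- def get_result_01(list01:list):
--     result_list = [] # 第一个元素就是最大值，第二个最小值， 第三个求和
--     max_result = list01[0]
--     min_result = list01[0]
--     sum_result = 0
--     # 求最大值  最小值   求和
--     for i in list01:
--         if i > max_result:
--             max_result = i
--         if i < min_result:
--             min_result = i
--         sum_result += i
--     result_list.append(max_result)
--     result_list.append(min_result)
--     result_list.append(sum_result)
--
--     # 返回一个集合
--     return result_list
-- ===== SOURCE B (Python) =====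
-- def get_result_01(list01: list):
--     # three idiomatic library aggregations instead of one fused accumulator loop
--     return [max(list01), min(list01), sum(list01)]
-- ===== Notes on version B (the rewrite author's own statement) =====
-- stated objective: idiomatic
-- what changed: Replaces the single fused accumulator loop with three builtin aggregations max/min/sum.
import Mathlib
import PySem

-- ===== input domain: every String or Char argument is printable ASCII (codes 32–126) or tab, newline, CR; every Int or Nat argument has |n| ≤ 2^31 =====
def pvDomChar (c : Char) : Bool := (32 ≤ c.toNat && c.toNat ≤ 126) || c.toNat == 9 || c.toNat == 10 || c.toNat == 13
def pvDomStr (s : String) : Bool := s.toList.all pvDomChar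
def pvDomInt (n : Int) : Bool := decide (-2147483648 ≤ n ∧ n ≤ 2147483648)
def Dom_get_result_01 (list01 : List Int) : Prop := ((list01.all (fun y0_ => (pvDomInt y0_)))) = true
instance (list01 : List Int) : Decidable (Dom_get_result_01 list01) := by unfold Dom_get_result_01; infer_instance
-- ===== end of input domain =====

-- B replaces A's single fused accumulator loop by three builtin aggregations (max/min/sum): idiomatic, same cost.

-- ===== PORT A =====
def get_result_01 (list01 : List Int) : List Int :=
  match PySem.List.pyGet? list01 0 with
  | none => []   -- Python raises IndexError here: excluded by Pre_
  | some h =>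
    let st := list01.foldl
      (fun (st : Int × Int × Int) i =>
        let mx := if i > st.1 then i else st.1
        let mn := if i < st.2.1 then i else st.2.1
        (mx, mn, st.2.2 + i)) (h, h, 0)
    [st.1, st.2.1, st.2.2]

-- ===== PORT B =====
def get_result_01_alt (list01 : List Int) : List Int :=
  match PySem.List.max? list01 (fun x => x), PySem.List.min? list01 (fun x => x) with
  | some mx, some mn => [mx, mn, list01.foldl (· + ·) 0]
  | _, _ => []   -- max()/min() on the empty list raise ValueError: excluded by Pre_

-- ===== PRECONDITION & SPEC =====
-- A indexes the first element, raising IndexError on the empty list, so it is excluded.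
def Pre_get_result_01 (list01 : List Int) : Prop := list01 ≠ []
instance (list01 : List Int) : Decidable (Pre_get_result_01 list01) := by unfold Pre_get_result_01; infer_instance
def pvWitness_get_result_01 : List Int := [3, -1, 4]

def Spec_get_result_01 (list01 : List Int) (out : List Int) : Prop := out = get_result_01_alt list01
instance (list01 : List Int) (out : List Int) : Decidable (Spec_get_result_01 list01 out) := by unfold Spec_get_result_01; infer_instance

-- ===== CLAIM (what is proved, stated in full; the proofs are below) =====
def Claim_equal_get_result_01 : Prop := ∀ (list01 : List Int), Dom_get_result_01 list01 → Pre_get_result_01 list01 → Spec_get_result_01 list01 (get_result_01 list01)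

-- ===== LEMMAS AND PROOFS =====

-- A's fused loop computes the three independent folds componentwise.
theorem pvFused_eq (t : List Int) (mx mn s : Int) :
    t.foldl (fun (st : Int × Int × Int) i =>
        let a := if i > st.1 then i else st.1
        let b := if i < st.2.1 then i else st.2.1
        (a, b, st.2.2 + i)) (mx, mn, s)
      = (t.foldl max mx, t.foldl min mn, t.foldl (· + ·) s) := by
  induction t generalizing mx mn s with
  | nil => rfl
  | cons x t ih =>
    have h1 : (if x > mx then x else mx) = max mx x := by omega
    have h2 : (if x < mn then x else mn) = min mn x := by omega
    simp only [List.foldl_cons, h1, h2, ih]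

-- ===== VERDICT (by name: the statement is the Claim_ definition above) =====
theorem get_result_01_spec : Claim_equal_get_result_01 := by
  intro list01 _ hpre
  cases list01 with
  | nil => exact absurd rfl hpre
  | cons h t =>
    show get_result_01 (h :: t) = get_result_01_alt (h :: t)
    simp only [get_result_01, get_result_01_alt, PySem.List.pyGet?_zero_cons,
      PySem.List.max?_id_cons, PySem.List.min?_id_cons, List.foldl_cons, pvFused_eq]
    simp
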